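-- pv_equiv track=rewrite | github.com/AbereTruphenah/Python | EXERCISES/list.py | alice_wins
-- ===== SOURCE A (Python) =====
-- def alice_wins(nums):
--     single_digits=[]
--     double_digits=[]
--     for num in nums:
--         if 0<=num<10:
--             single_digits.append(num)
--         elif 10<=num<100:
--             double_digits.append(num)
--
--     alice_single=sum(single_digits)
--     alice_double=sum(double_digits)
--     bob_single=sum(single_digits)
--     bob_double=sum(double_digits)
--
--     alice_wins_singles=alice_single>bob_double
--     alice_wins_doubles=alice_double>bob_single
--
--     return alice_wins_singles or alice_wins_doubles
-- ===== SOURCE B (Python) =====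
-- def alice_wins(nums):
--     # S != D  <=>  (S + D) != 2*S, so no single/double split is needed:
--     # sum everything in range once, sum the singles once, compare.
--     total = sum(n for n in nums if 0 <= n < 100)
--     singles = sum(n for n in nums if 0 <= n < 10)
--     return total != 2 * singles
-- ===== Notes on version B (the rewrite author's own statement) =====
-- stated objective: simpler
-- what changed: Drops the single/double bucketing entirely: B computes total = sum of all in-range values and singles = sum of single-digit values in two filtered passes and returns total != 2*singles, using the identity S>D or D>S <=> S != D <=> S+D != 2S.
import Mathlib
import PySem

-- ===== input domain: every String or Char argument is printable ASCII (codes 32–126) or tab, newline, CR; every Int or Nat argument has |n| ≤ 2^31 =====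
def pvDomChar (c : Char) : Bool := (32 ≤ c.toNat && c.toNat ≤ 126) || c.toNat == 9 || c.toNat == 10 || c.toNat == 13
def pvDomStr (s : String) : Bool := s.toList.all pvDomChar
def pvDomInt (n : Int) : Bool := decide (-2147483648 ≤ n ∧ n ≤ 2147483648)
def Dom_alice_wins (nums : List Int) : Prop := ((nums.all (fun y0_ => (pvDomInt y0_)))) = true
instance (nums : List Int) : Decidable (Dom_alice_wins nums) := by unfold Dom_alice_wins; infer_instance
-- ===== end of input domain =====

-- B replaces A's single/double bucketing by two filtered sums and the identity S>D or D>S ⟺ S+D ≠ 2S (objective: simpler).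


-- ===== PORT A =====
def alice_wins (nums : List Int) : Bool :=
  let lists := nums.foldl (fun (st : List Int × List Int) num =>
    if 0 ≤ num ∧ num < 10 then (st.1 ++ [num], st.2)
    else if 10 ≤ num ∧ num < 100 then (st.1, st.2 ++ [num])
    else st) ([], [])
  let single_digits := lists.1
  let double_digits := lists.2
  let alice_single := single_digits.sum
  let alice_double := double_digits.sum
  let bob_single := single_digits.sum
  let bob_double := double_digits.sum
  let alice_wins_singles := alice_single > bob_double
  let alice_wins_doubles := alice_double > bob_single
  alice_wins_singles || alice_wins_doubles

-- ===== PORT B =====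
def alice_wins_alt (nums : List Int) : Bool :=
  let total := (nums.filter (fun n => decide (0 ≤ n ∧ n < 100))).sum
  let singles := (nums.filter (fun n => decide (0 ≤ n ∧ n < 10))).sum
  total ≠ 2 * singles

-- ===== PRECONDITION & SPEC =====
def Spec_alice_wins (nums : List Int) (out : Bool) : Prop := out = alice_wins_alt nums
instance (nums : List Int) (out : Bool) : Decidable (Spec_alice_wins nums out) := by unfold Spec_alice_wins; infer_instance

-- ===== CLAIM (what is proved, stated in full; the proofs are below) =====
def Claim_equal_alice_wins : Prop := ∀ (nums : List Int), Dom_alice_wins nums → Spec_alice_wins nums (alice_wins nums)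

-- ===== LEMMAS AND PROOFS =====
-- A's fold builds exactly the two filtered sublists.
theorem alice_fold_filters (nums : List Int) (a b : List Int) :
    nums.foldl (fun (st : List Int × List Int) num =>
      if 0 ≤ num ∧ num < 10 then (st.1 ++ [num], st.2)
      else if 10 ≤ num ∧ num < 100 then (st.1, st.2 ++ [num])
      else st) (a, b) =
    (a ++ nums.filter (fun n => decide (0 ≤ n ∧ n < 10)),
     b ++ nums.filter (fun n => decide (10 ≤ n ∧ n < 100))) := by
  induction nums generalizing a b with
  | nil => simp
  | cons x xs ih =>
    simp only [List.foldl_cons, List.filter_cons]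
    by_cases h1 : 0 ≤ x ∧ x < 10
    · have h2 : ¬ (10 ≤ x) := by omega
      rw [if_pos h1, ih]
      simp [h1.1, h1.2, h2]
    · by_cases h2 : 10 ≤ x ∧ x < 100
      · have h3 : ¬ (x < 10) := by omega
        rw [if_neg h1, if_pos h2, ih]
        simp [h2.1, h2.2, h3]
      · rw [if_neg h1, if_neg h2, ih]
        simp only [decide_eq_true_eq]
        rw [if_neg h1, if_neg h2]

-- The in-range sum splits into the single-digit and double-digit sums.
theorem sum_split (nums : List Int) :
    (nums.filter (fun n => decide (0 ≤ n ∧ n < 100))).sum =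
    (nums.filter (fun n => decide (0 ≤ n ∧ n < 10))).sum +
    (nums.filter (fun n => decide (10 ≤ n ∧ n < 100))).sum := by
  induction nums with
  | nil => simp
  | cons x xs ih =>
    simp only [List.filter_cons, decide_eq_true_eq]
    by_cases hA : 0 ≤ x ∧ x < 100 <;> by_cases hB : 0 ≤ x ∧ x < 10 <;>
      by_cases hC : 10 ≤ x ∧ x < 100 <;>
      first
        | omega
        | (split_ifs <;> simp_all <;> omega)

-- ===== VERDICT (by name: the statement is the Claim_ definition above) =====
theorem alice_wins_spec : Claim_equal_alice_wins := by
  intro nums _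
  simp only [Spec_alice_wins, alice_wins, alice_wins_alt, alice_fold_filters nums [] [],
    List.nil_append, sum_split nums]
  set S := (nums.filter (fun n => decide (0 ≤ n ∧ n < 10))).sum
  set D := (nums.filter (fun n => decide (10 ≤ n ∧ n < 100))).sum
  by_cases h : S = D
  · simp [h, two_mul]
  · have h1 : S + D ≠ 2 * S := by omega
    have h2 : D < S ∨ S < D := by omega
    simp only [GT.gt, ne_eq, h1, not_false_eq_true, decide_true]
    rcases h2 with h2 | h2 <;> simp [h2]
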